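-- pv_equiv track=rewrite | github.com/yashb98/multi-agent-patterns | jobpulse/github_matcher.py | _skill_match
-- ===== SOURCE A (Python) =====
-- def _normalize(skill: str) -> str:
--     """Lowercase, strip, replace hyphens/underscores with spaces."""
--     return skill.lower().strip().replace("-", " ").replace("_", " ")
--
-- def _skill_match(skill: str, keywords: list[str], synonyms: dict[str, list[str]]) -> bool:
--     """Return True if *skill* (or any of its synonyms) appears in *keywords*.
--
--     The synonym dict maps canonical -> [synonyms].
--     We build a full equivalence set for the skill and check intersection with
--     the normalised keyword list.
--     """
--     norm_skill = _normalize(skill)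
--     norm_keywords = {_normalize(kw) for kw in keywords}
--
--     # Equivalence set: start with the skill itself
--     equiv: set[str] = {norm_skill}
--
--     for canonical, alts in synonyms.items():
--         norm_canonical = _normalize(canonical)
--         norm_alts = {_normalize(a) for a in alts}
--         full_group = {norm_canonical} | norm_alts
--         if norm_skill in full_group:
--             equiv |= full_group
--
--     return bool(equiv & norm_keywords)
-- ===== SOURCE B (Python) =====
-- def _normalize(skill: str) -> str:
--     """Lowercase, strip, replace hyphens/underscores with spaces."""
--     return skill.lower().strip().replace("-", " ").replace("_", " ")
--
-- def _skill_match(skill: str, keywords: list[str], synonyms: dict[str, list[str]]) -> bool: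
--     """Inverted index: map each normalized member string to the set of group
--     ids it occurs in, then scan the keywords once; a keyword matches if it
--     normalizes to the skill itself or shares a group id with it."""
--     norm_skill = _normalize(skill)
--     index: dict[str, set[int]] = {}
--     for i, (canonical, alts) in enumerate(synonyms.items()):
--         for member in [canonical, *alts]:
--             index.setdefault(_normalize(member), set()).add(i)
--     skill_groups = index.get(norm_skill, set())
--     for kw in keywords:
--         nk = _normalize(kw)
--         if nk == norm_skill or skill_groups & index.get(nk, set()):
--             return True
--     return False
-- ===== Notes on version B (the rewrite author's own statement) =====
-- stated objective: alternative
-- what changed: Replaces A's build-equivalence-set-then-intersect strategy with an inverted index from each normalized synonym member to the set of group ids it occurs in, then a single short-circuiting scan over keywords comparing group-id sets; the per-group membership scan for the skill disappears into a dict lookup.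
import Mathlib
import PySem

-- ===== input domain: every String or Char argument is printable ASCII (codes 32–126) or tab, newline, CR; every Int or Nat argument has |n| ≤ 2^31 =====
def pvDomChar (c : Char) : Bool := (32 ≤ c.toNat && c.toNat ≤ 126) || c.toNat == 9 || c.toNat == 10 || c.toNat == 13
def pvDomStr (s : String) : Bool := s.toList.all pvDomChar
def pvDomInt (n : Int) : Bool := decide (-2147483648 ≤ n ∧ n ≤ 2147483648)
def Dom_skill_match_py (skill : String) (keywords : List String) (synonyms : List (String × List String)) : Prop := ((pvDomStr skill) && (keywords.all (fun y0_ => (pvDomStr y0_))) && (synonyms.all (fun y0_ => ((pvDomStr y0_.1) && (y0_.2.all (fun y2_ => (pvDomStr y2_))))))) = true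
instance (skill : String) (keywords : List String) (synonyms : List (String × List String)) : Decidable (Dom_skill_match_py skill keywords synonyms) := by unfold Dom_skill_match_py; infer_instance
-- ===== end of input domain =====

-- B replaces A's build-equivalence-set-then-intersect strategy with an inverted index
-- (normalized member -> set of group ids) and a single short-circuiting scan over the
-- keywords comparing group-id sets (objective: alternative).

-- ===== PORT A =====
def pvNorm (s : String) : String :=
  PySem.Str.replace (PySem.Str.replace (PySem.Str.strip (PySem.Str.lower s)) "-" " ") "_" " "

def skill_match_py (skill : String) (keywords : List String) (synonyms : List (String × List String)) : Bool :=
  let normSkill := pvNorm skill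
  let normKeywords : PySem.Set String := PySem.Set.ofList (keywords.map pvNorm)
  let equiv : PySem.Set String :=
    synonyms.foldl (fun equiv p =>
      let normCanonical := pvNorm p.1
      let normAlts : PySem.Set String := PySem.Set.ofList (p.2.map pvNorm)
      let fullGroup := PySem.Set.union (PySem.Set.ofList [normCanonical]) normAlts
      if PySem.Set.contains fullGroup normSkill then PySem.Set.union equiv fullGroup else equiv)
      (PySem.Set.ofList [normSkill])
  !(PySem.Set.inter equiv normKeywords).isEmpty

-- ===== PORT B =====
-- index.setdefault(nm, set()).add(i) sets index[nm] = index.get(nm, set()) with i added: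
-- exactly Dict.modify nm Set.empty (Set.add · i).
def skill_match_py_alt (skill : String) (keywords : List String) (synonyms : List (String × List String)) : Bool :=
  let normSkill := pvNorm skill
  let index : PySem.Dict String (PySem.Set Int) :=
    (PySem.List.enumerate synonyms 0).foldl (fun d q =>
      (q.2.1 :: q.2.2).foldl (fun d m =>
        d.modify (pvNorm m) PySem.Set.empty (fun s => PySem.Set.add s q.1)) d)
      PySem.Dict.empty
  let skillGroups := index.getD normSkill PySem.Set.empty
  keywords.any (fun kw =>
    let nk := pvNorm kw
    nk == normSkill || !(PySem.Set.inter skillGroups (index.getD nk PySem.Set.empty)).isEmpty)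

-- ===== PRECONDITION & SPEC =====
def Spec_skill_match_py (skill : String) (keywords : List String) (synonyms : List (String × List String)) (out : Bool) : Prop := out = skill_match_py_alt skill keywords synonyms
instance (skill : String) (keywords : List String) (synonyms : List (String × List String)) (out : Bool) : Decidable (Spec_skill_match_py skill keywords synonyms out) := by unfold Spec_skill_match_py; infer_instance

-- ===== CLAIM (what is proved, stated in full; the proofs are below) =====
def Claim_equal_skill_match_py : Prop := ∀ (skill : String) (keywords : List String) (synonyms : List (String × List String)), Dom_skill_match_py skill keywords synonyms → Spec_skill_match_py skill keywords synonyms (skill_match_py skill keywords synonyms)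

-- ===== LEMMAS AND PROOFS =====

-- "the skill (or any string x) lies in A's accumulated equivalence set"
theorem mem_equiv_foldl (ns : String) (syns : List (String × List String)) (init : PySem.Set String) (x : String) :
    x ∈ syns.foldl (fun equiv p =>
      let normCanonical := pvNorm p.1
      let normAlts : PySem.Set String := PySem.Set.ofList (p.2.map pvNorm)
      let fullGroup := PySem.Set.union (PySem.Set.ofList [normCanonical]) normAlts
      if PySem.Set.contains fullGroup ns then PySem.Set.union equiv fullGroup else equiv) init
    ↔ x ∈ init ∨ ∃ p ∈ syns,
        (ns = pvNorm p.1 ∨ ns ∈ p.2.map pvNorm) ∧ (x = pvNorm p.1 ∨ x ∈ p.2.map pvNorm) := by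
  induction syns generalizing init with
  | nil => simp
  | cons p rest ih =>
    simp only [List.foldl_cons]
    rw [ih]
    by_cases h : PySem.Set.contains
        (PySem.Set.union (PySem.Set.ofList [pvNorm p.1]) (PySem.Set.ofList (p.2.map pvNorm))) ns = true
    · have hns : ns = pvNorm p.1 ∨ ns ∈ p.2.map pvNorm := by
        have := (PySem.Set.contains_iff _ _).mp h
        simpa [PySem.Set.mem_union, PySem.Set.mem_ofList] using this
      simp only [h, if_pos]
      simp only [PySem.Set.mem_union, PySem.Set.mem_ofList, List.mem_cons]
      constructor
      · rintro ((hi | hx) | ⟨q, hq, h1, h2⟩)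
        · exact Or.inl hi
        · exact Or.inr ⟨p, Or.inl rfl, hns, by simpa using hx⟩
        · exact Or.inr ⟨q, Or.inr hq, h1, h2⟩
      · rintro (hi | ⟨q, (rfl | hq), h1, h2⟩)
        · exact Or.inl (Or.inl hi)
        · exact Or.inl (Or.inr (by simpa using h2))
        · exact Or.inr ⟨q, hq, h1, h2⟩
    · have hns : ¬ (ns = pvNorm p.1 ∨ ns ∈ p.2.map pvNorm) := by
        intro hc
        apply h
        rw [PySem.Set.contains_iff]
        simpa [PySem.Set.mem_union, PySem.Set.mem_ofList] using hc
      simp only [h, Bool.false_eq_true, if_false, List.mem_cons]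
      constructor
      · rintro (hi | ⟨q, hq, h1, h2⟩)
        · exact Or.inl hi
        · exact Or.inr ⟨q, Or.inr hq, h1, h2⟩
      · rintro (hi | ⟨q, (rfl | hq), h1, h2⟩)
        · exact Or.inl hi
        · exact absurd h1 hns
        · exact Or.inr ⟨q, hq, h1, h2⟩

-- inner loop of B's index build: one group's members, one id
theorem mem_getD_inner (ms : List String) (j : Int) (d : PySem.Dict String (PySem.Set Int))
    (x : String) (i : Int) :
    i ∈ (ms.foldl (fun d m => d.modify (pvNorm m) PySem.Set.empty (fun s => PySem.Set.add s j)) d).getD x PySem.Set.empty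
    ↔ i ∈ d.getD x PySem.Set.empty ∨ (i = j ∧ x ∈ ms.map pvNorm) := by
  induction ms generalizing d with
  | nil => simp
  | cons m rest ih =>
    rw [List.foldl_cons, ih]
    by_cases hx : x = pvNorm m
    · subst hx
      rw [PySem.Dict.getD_modify_self]
      simp only [PySem.Set.mem_add, List.map_cons, List.mem_cons]
      constructor
      · rintro ((hd | hij) | ⟨hij, hr⟩)
        · exact Or.inl hd
        · exact Or.inr ⟨hij, Or.inl trivial⟩
        · exact Or.inr ⟨hij, Or.inr hr⟩
      · rintro (hd | ⟨hij, _⟩)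
        · exact Or.inl (Or.inl hd)
        · exact Or.inl (Or.inr hij)
    · rw [PySem.Dict.getD_modify_of_ne (hne := hx)]
      simp only [List.map_cons, List.mem_cons]
      constructor
      · rintro (hd | ⟨hij, hr⟩)
        · exact Or.inl hd
        · exact Or.inr ⟨hij, Or.inr hr⟩
      · rintro (hd | ⟨hij, (he | hr)⟩)
        · exact Or.inl hd
        · exact absurd he hx
        · exact Or.inr ⟨hij, hr⟩

-- outer loop of B's index build over enumerated groups
theorem mem_getD_index (l : List (Int × (String × List String))) (d : PySem.Dict String (PySem.Set Int))
    (x : String) (i : Int) :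
    i ∈ (l.foldl (fun d q =>
        (q.2.1 :: q.2.2).foldl (fun d m =>
          d.modify (pvNorm m) PySem.Set.empty (fun s => PySem.Set.add s q.1)) d) d).getD x PySem.Set.empty
    ↔ i ∈ d.getD x PySem.Set.empty ∨ ∃ q ∈ l, i = q.1 ∧ x ∈ (q.2.1 :: q.2.2).map pvNorm := by
  induction l generalizing d with
  | nil => simp
  | cons q rest ih =>
    rw [List.foldl_cons, ih, mem_getD_inner]
    simp only [List.mem_cons]
    constructor
    · rintro ((hd | hq) | ⟨r, hr, h1, h2⟩)
      · exact Or.inl hd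
      · exact Or.inr ⟨q, Or.inl rfl, hq⟩
      · exact Or.inr ⟨r, Or.inr hr, h1, h2⟩
    · rintro (hd | ⟨r, (rfl | hr), h1, h2⟩)
      · exact Or.inl (Or.inl hd)
      · exact Or.inl (Or.inr ⟨h1, h2⟩)
      · exact Or.inr ⟨r, hr, h1, h2⟩

-- entries of enumerate with the same index are equal
theorem enumerate_inj {α : Type} (xs : List α) (q q' : Int × α)
    (hq : q ∈ PySem.List.enumerate xs 0) (hq' : q' ∈ PySem.List.enumerate xs 0)
    (h : q.1 = q'.1) : q = q' := by
  rw [PySem.List.mem_enumerate_iff] at hq hq'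
  obtain ⟨k, hk, rfl⟩ := hq
  obtain ⟨k', hk', rfl⟩ := hq'
  simp only [zero_add] at h
  have : k = k' := by exact_mod_cast h
  subst this
  rfl

theorem skill_match_eq (skill : String) (keywords : List String) (synonyms : List (String × List String)) :
    skill_match_py skill keywords synonyms = skill_match_py_alt skill keywords synonyms := by
  rw [Bool.eq_iff_iff]
  unfold skill_match_py skill_match_py_alt
  simp only []
  set ns := pvNorm skill with hns
  -- the common characterisation P
  have hgrp : ∀ (p : String × List String) (y : String),
      y ∈ (p.1 :: p.2).map pvNorm ↔ (y = pvNorm p.1 ∨ y ∈ p.2.map pvNorm) := by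
    intro p y; simp
  constructor
  · -- A → B
    intro hA
    rw [Bool.not_eq_true', List.isEmpty_eq_false_iff_exists_mem] at hA
    obtain ⟨x, hx⟩ := hA
    rw [PySem.Set.mem_inter, mem_equiv_foldl] at hx
    obtain ⟨hxe, hxk⟩ := hx
    rw [PySem.Set.mem_ofList, List.mem_map] at hxk
    obtain ⟨kw, hkw, rfl⟩ := hxk
    rw [List.any_eq_true]
    rcases hxe with h | ⟨p, hp, h1, h2⟩
    · refine ⟨kw, hkw, ?_⟩
      have hkn : pvNorm kw = ns := by simpa [PySem.Set.mem_ofList] using h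
      simp [hkn]
    · refine ⟨kw, hkw, ?_⟩
      rw [Bool.or_eq_true]
      right
      rw [Bool.not_eq_true', List.isEmpty_eq_false_iff_exists_mem]
      -- shared group id: the index of p in synonyms
      obtain ⟨k, hk, hpk⟩ := List.mem_iff_getElem.mp hp
      refine ⟨(k : Int), ?_⟩
      rw [PySem.Set.mem_inter, mem_getD_index, mem_getD_index]
      have hq : ((k : Int), synonyms[k]) ∈ PySem.List.enumerate synonyms 0 := by
        rw [PySem.List.mem_enumerate_iff]
        exact ⟨k, hk, by simp⟩
      constructor
      · right
        exact ⟨((k : Int), synonyms[k]), hq, rfl, by rw [hpk]; exact (hgrp p ns).mpr h1⟩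
      · right
        exact ⟨((k : Int), synonyms[k]), hq, rfl, by rw [hpk]; exact (hgrp p (pvNorm kw)).mpr h2⟩
  · -- B → A
    intro hB
    rw [List.any_eq_true] at hB
    obtain ⟨kw, hkw, hb⟩ := hB
    rw [Bool.not_eq_true', List.isEmpty_eq_false_iff_exists_mem]
    rw [Bool.or_eq_true] at hb
    rcases hb with hb | hb
    · -- direct hit: normalized keyword equals the skill
      have : pvNorm kw = ns := by simpa using hb
      refine ⟨ns, ?_⟩
      rw [PySem.Set.mem_inter, mem_equiv_foldl]
      exact ⟨Or.inl (by simp [PySem.Set.mem_ofList]), by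
        rw [PySem.Set.mem_ofList, List.mem_map]; exact ⟨kw, hkw, this⟩⟩
    · rw [Bool.not_eq_true', List.isEmpty_eq_false_iff_exists_mem] at hb
      obtain ⟨i, hi⟩ := hb
      rw [PySem.Set.mem_inter, mem_getD_index, mem_getD_index] at hi
      obtain ⟨h1, h2⟩ := hi
      rcases h1 with h1 | ⟨q, hq, rfl, hmem1⟩
      · simp at h1
      rcases h2 with h2 | ⟨q', hq', hi', hmem2⟩
      · simp at h2
      have : q = q' := enumerate_inj synonyms q q' hq hq' hi'
      subst this
      have hp : q.2 ∈ synonyms := by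
        have := PySem.List.map_snd_enumerate (xs := synonyms) (s := 0)
        rw [← this]
        exact List.mem_map_of_mem hq
      refine ⟨pvNorm kw, ?_⟩
      rw [PySem.Set.mem_inter, mem_equiv_foldl]
      refine ⟨Or.inr ⟨q.2, hp, (hgrp q.2 ns).mp hmem1, (hgrp q.2 (pvNorm kw)).mp hmem2⟩, ?_⟩
      rw [PySem.Set.mem_ofList, List.mem_map]
      exact ⟨kw, hkw, rfl⟩

-- ===== VERDICT (by name: the statement is the Claim_ definition above) =====
theorem skill_match_py_spec : Claim_equal_skill_match_py := by
  intro skill keywords synonyms _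
  unfold Spec_skill_match_py
  exact skill_match_eq skill keywords synonyms
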